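-- pv_equiv track=rewrite | github.com/constanhack/2450-project | code_base_with_classes/business_logic.py | Allocate_Memory
-- ===== SOURCE A (Python) =====
-- def Allocate_Memory(file,memory_size):
--     MEM = dict()
--     for i in range(memory_size):
--         if i < 10:
--             MEM[f'0{i}'] = '+0000'
--         else:
--             MEM[f'{i}'] = '+0000'
--     index = 0
--     for line in file:
--         if index < 10:
--             MEM[f'0{index}'] = line.strip()
--         else:
--             MEM[f'{index}'] = line.strip()
--         index += 1
--     return MEM
-- ===== SOURCE B (Python) =====
-- def Allocate_Memory(file, memory_size):
--     # Build the dict once from a closed-form table: slot i holds the i-th stripped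
--     # file line if it exists, else the '+0000' default; no mutation passes.
--     stripped = [line.strip() for line in file]
--     n = len(stripped)
--     return dict(
--         (('0%d' % i) if i < 10 else ('%d' % i),
--          stripped[i] if i < n else '+0000')
--         for i in range(max(memory_size, n)))
-- ===== Notes on version B (the rewrite author's own statement) =====
-- stated objective: alternative
-- what changed: A imperatively mutates a dict in two sequential passes (pre-fill all slots with '+0000', then overwrite a prefix with stripped file lines); B computes each slot's final value directly by index (stripped[i] if i < len(file) else '+0000') and constructs the dict once from that closed-form table over range(max(memory_size, len(file))), with no overwrites at all.
import Mathlib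
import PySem

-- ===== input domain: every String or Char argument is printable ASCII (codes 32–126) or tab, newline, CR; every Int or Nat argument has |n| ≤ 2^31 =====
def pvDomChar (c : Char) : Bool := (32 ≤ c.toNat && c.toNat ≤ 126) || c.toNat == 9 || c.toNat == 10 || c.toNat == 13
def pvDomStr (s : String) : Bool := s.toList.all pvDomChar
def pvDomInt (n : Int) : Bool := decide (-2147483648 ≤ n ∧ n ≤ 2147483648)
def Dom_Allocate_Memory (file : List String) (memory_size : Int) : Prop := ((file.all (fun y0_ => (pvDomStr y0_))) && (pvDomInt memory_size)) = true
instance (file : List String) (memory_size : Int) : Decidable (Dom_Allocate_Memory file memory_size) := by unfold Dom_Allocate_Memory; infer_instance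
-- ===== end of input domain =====

-- B replaces A's two mutation passes (pre-fill defaults, then overwrite a prefix) by a
-- closed-form table: each slot's final value is computed directly by index and the dict is
-- built once from it (alternative decomposition, same cost).

-- f'0{i}' if i < 10 else f'{i}' (A) = ('0%d' % i) if i < 10 else ('%d' % i) (B): exact,
-- the char '0' prepended to str(i); PySem.Int.toStr i = String.ofList (PySem.Int.toChars i)
def pvKey (i : Int) : String :=
  if i < 10 then String.ofList ('0' :: PySem.Int.toChars i) else PySem.Int.toStr i

-- the body of A's "for line in file: MEM[key(index)] = line.strip(); index += 1"
def pvLineStep (p : PySem.Dict String String × Int) (line : String) : PySem.Dict String String × Int :=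
  (p.1.insert (pvKey p.2) (PySem.Str.strip line), p.2 + 1)

-- ===== PORT A =====
def Allocate_Memory (file : List String) (memory_size : Int) : List (String × String) :=
  ((file.foldl pvLineStep
      ((PySem.List.pyRange 0 memory_size 1).foldl
        (fun d i => d.insert (pvKey i) "+0000") PySem.Dict.empty, 0)).1).items

-- ===== PORT B =====
-- stripped[i] (0 ≤ i < n from the range and the guard) is ported as getD i.toNat "" (exact in range)
def Allocate_Memory_alt (file : List String) (memory_size : Int) : List (String × String) :=
  let stripped := file.map PySem.Str.strip
  let n : Int := stripped.length
  (PySem.Dict.ofList ((PySem.List.pyRange 0 (max memory_size n) 1).map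
      (fun i => (pvKey i, if i < n then stripped.getD i.toNat "" else "+0000")))).items

-- ===== PRECONDITION & SPEC =====
def Spec_Allocate_Memory (file : List String) (memory_size : Int) (out : List (String × String)) : Prop := out = Allocate_Memory_alt file memory_size
instance (file : List String) (memory_size : Int) (out : List (String × String)) : Decidable (Spec_Allocate_Memory file memory_size out) := by unfold Spec_Allocate_Memory; infer_instance

-- ===== CLAIM (what is proved, stated in full; the proofs are below) =====
def Claim_equal_Allocate_Memory : Prop := ∀ (file : List String) (memory_size : Int), Dom_Allocate_Memory file memory_size → Spec_Allocate_Memory file memory_size (Allocate_Memory file memory_size)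

-- ===== LEMMAS AND PROOFS =====

-- decimal digit characters are injective below the base
lemma pvDigitChar_inj {a b : Nat} (ha : a < 10) (hb : b < 10)
    (h : Nat.digitChar a = Nat.digitChar b) : a = b := by
  interval_cases a <;> interval_cases b <;> simp_all [Nat.digitChar]

lemma pvToDigits_decompose (n : Nat) (h10 : ¬ n < 10) :
    Nat.toDigits 10 (n / 10) ++ [(n % 10).digitChar] = Nat.toDigits 10 n := by
  have hq : 0 < n / 10 := Nat.div_pos (le_of_not_gt h10) (by norm_num)
  have := Nat.toDigits_append_toDigits (b := 10) (n := n / 10) (d := n % 10)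
    (by norm_num) hq (Nat.mod_lt _ (by norm_num))
  rw [Nat.div_add_mod] at this
  rwa [Nat.toDigits_of_lt_base (Nat.mod_lt _ (by norm_num))] at this

-- the leading character of the decimal form of a positive Nat is never '0'
lemma pvToDigits_head_ne_zero : ∀ n : Nat, 0 < n → ∀ c l, Nat.toDigits 10 n = c :: l → c ≠ '0' := by
  intro n
  induction n using Nat.strong_induction_on with
  | _ n ih =>
    intro hn c l h
    by_cases h10 : n < 10
    · rw [Nat.toDigits_of_lt_base h10] at h
      cases h
      interval_cases n <;> simp_all [Nat.digitChar]
    · have hq : 0 < n / 10 := Nat.div_pos (le_of_not_gt h10) (by norm_num)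
      obtain ⟨c', l', hq'⟩ := List.exists_cons_of_ne_nil
        (List.ne_nil_of_length_pos (Nat.length_toDigits_pos (b := 10) (n := n / 10)))
      have hc : c = c' := by
        rw [← pvToDigits_decompose n h10, hq'] at h
        simpa using congrArg (·.head?) h.symm
      exact hc ▸ ih (n / 10) (Nat.div_lt_self hn (by norm_num)) hq c' l' hq'

-- decimal forms are injective
lemma pvToDigits_inj : ∀ a b : Nat, Nat.toDigits 10 a = Nat.toDigits 10 b → a = b := by
  intro a
  induction a using Nat.strong_induction_on with
  | _ a ih =>
    intro b h
    by_cases ha : a < 10 <;> by_cases hb : b < 10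
    · rw [Nat.toDigits_of_lt_base ha, Nat.toDigits_of_lt_base hb] at h
      exact pvDigitChar_inj ha hb (List.cons.injEq .. ▸ h).1
    · exfalso
      have hlb : 2 ≤ (Nat.toDigits 10 b).length := by
        rw [← pvToDigits_decompose b hb, List.length_append]
        have := Nat.length_toDigits_pos (b := 10) (n := b / 10)
        simp; omega
      rw [← h, Nat.toDigits_of_lt_base ha] at hlb
      simp at hlb
    · exfalso
      have hla : 2 ≤ (Nat.toDigits 10 a).length := by
        rw [← pvToDigits_decompose a ha, List.length_append]
        have := Nat.length_toDigits_pos (b := 10) (n := a / 10)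
        simp; omega
      rw [h, Nat.toDigits_of_lt_base hb] at hla
      simp at hla
    · rw [← pvToDigits_decompose a ha, ← pvToDigits_decompose b hb] at h
      obtain ⟨h1, h2⟩ := List.append_inj' h (by simp)
      have e1 : a / 10 = b / 10 := ih (a / 10) (Nat.div_lt_self (by omega) (by norm_num)) _ h1
      have e2 : a % 10 = b % 10 :=
        pvDigitChar_inj (Nat.mod_lt _ (by norm_num)) (Nat.mod_lt _ (by norm_num))
          (List.cons.injEq .. ▸ h2).1
      omega

lemma pvToChars_natCast (i : Nat) : PySem.Int.toChars (i : Int) = Nat.toDigits 10 i := by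
  simp [PySem.Int.toChars]

-- the memory keys are injective over natural indices
lemma pvKey_inj {i j : Nat} (h : pvKey (i : Int) = pvKey (j : Int)) : i = j := by
  unfold pvKey at h
  rw [PySem.Int.toStr, PySem.Int.toStr, pvToChars_natCast, pvToChars_natCast] at h
  by_cases hi : (i : Int) < 10 <;> by_cases hj : (j : Int) < 10 <;>
    simp only [hi, hj, if_true, if_false] at h
  · exact pvToDigits_inj i j (by simpa using String.ofList_inj.mp h)
  · have h' := String.ofList_inj.mp h
    obtain ⟨c, l, hc⟩ := List.exists_cons_of_ne_nil
      (List.ne_nil_of_length_pos (Nat.length_toDigits_pos (b := 10) (n := j)))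
    rw [hc] at h'
    exact absurd (List.cons.injEq .. ▸ h').1.symm
      (pvToDigits_head_ne_zero j (by omega) c l hc)
  · have h' := String.ofList_inj.mp h
    obtain ⟨c, l, hc⟩ := List.exists_cons_of_ne_nil
      (List.ne_nil_of_length_pos (Nat.length_toDigits_pos (b := 10) (n := i)))
    rw [hc] at h'
    exact absurd (List.cons.injEq .. ▸ h').1
      (pvToDigits_head_ne_zero i (by omega) c l hc)
  · exact pvToDigits_inj i j (String.ofList_inj.mp h)

-- the line loop on a dict whose items are the keyed range [0, m): overwrites in place below m, appends above
lemma pvLineFold_items : ∀ (lines : List String) (j m : Nat) (w : Nat → String)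
    (d : PySem.Dict String String),
    d.items = (List.range m).map (fun (i : Nat) => (pvKey (i : Int), w i)) → j ≤ m →
    (lines.foldl pvLineStep (d, (j : Int))).1.items
      = (List.range (max m (j + lines.length))).map
          (fun (i : Nat) => (pvKey (i : Int),
            if j ≤ i ∧ i < j + lines.length then PySem.Str.strip (lines.getD (i - j) "") else w i)) := by
  intro lines
  induction lines with
  | nil =>
    intro j m w d hd hjm
    simp only [List.foldl_nil, List.length_nil, Nat.add_zero, Nat.max_eq_left hjm, hd]
    exact (List.map_congr_left fun i _ => by
      have : ¬ (j ≤ i ∧ i < j) := by omega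
      simp [this]).symm
  | cons l rest ih =>
    intro j m w d hd hjm
    have hkeys : d.keys = (List.range m).map (fun (i : Nat) => pvKey (i : Int)) := by
      rw [PySem.Dict.keys, hd, List.map_map]
      rfl
    simp only [List.foldl_cons]
    have hstep : pvLineStep (d, (j : Int)) l =
        (d.insert (pvKey (j : Int)) (PySem.Str.strip l), ((j + 1 : Nat) : Int)) := by
      simp only [pvLineStep, Nat.cast_add, Nat.cast_one]
    rw [hstep]
    by_cases hj : j < m
    · -- key present: overwrite in place
      have hmem : pvKey (j : Int) ∈ d.keys := by
        rw [hkeys]; exact List.mem_map_of_mem (List.mem_range.mpr hj)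
      have hcont : d.contains (pvKey (j : Int)) = true := by
        rw [PySem.Dict.contains_eq_decide_mem_keys]; simpa using hmem
      have hitems : (d.insert (pvKey (j : Int)) (PySem.Str.strip l)).items
          = (List.range m).map (fun (i : Nat) => (pvKey (i : Int),
              if i = j then PySem.Str.strip l else w i)) := by
        rw [PySem.Dict.items_insert_of_contains _ _ hcont, hd, List.map_map]
        refine List.map_congr_left fun i _ => ?_
        by_cases hij : i = j
        · subst hij; simp
        · have hne : (pvKey (i : Int) == pvKey (j : Int)) = false := by
            simp only [beq_eq_false_iff_ne, ne_eq]
            exact fun hc => hij (pvKey_inj hc)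
          simp only [Function.comp_apply, hne, Bool.false_eq_true, if_false, hij]
      rw [ih (j + 1) m (fun i => if i = j then PySem.Str.strip l else w i) _ hitems (by omega)]
      have hb : max m (j + 1 + rest.length) = max m (j + (l :: rest).length) := by
        simp only [List.length_cons]; omega
      rw [hb]
      refine List.map_congr_left fun i hi => ?_
      simp only [List.length_cons]
      by_cases h1 : j + 1 ≤ i ∧ i < j + 1 + rest.length
      · rw [if_pos h1, if_pos (by omega : j ≤ i ∧ i < j + (rest.length + 1))]
        have h3 : i - j = (i - j - 1) + 1 := by omega
        rw [h3, List.getD_cons_succ]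
        have h4 : i - (j + 1) = i - j - 1 := by omega
        rw [h4]
      · by_cases hij : i = j
        · rw [if_neg h1, if_pos hij, if_pos (by omega : j ≤ i ∧ i < j + (rest.length + 1)),
            show i - j = 0 by omega, List.getD_cons_zero]
        · rw [if_neg h1, if_neg hij,
            if_neg (by omega : ¬(j ≤ i ∧ i < j + (rest.length + 1)))]
    · -- key fresh: append, the range grows to j + 1
      have hjm' : m = j := by omega
      rw [hjm'] at hd hkeys
      rw [hjm']
      have hcont : d.contains (pvKey (j : Int)) = false := by
        rw [PySem.Dict.contains_eq_decide_mem_keys, hkeys]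
        simp only [decide_eq_false_iff_not, List.mem_map, List.mem_range, not_exists]
        rintro i ⟨hi, hk⟩
        exact absurd (pvKey_inj hk) (by omega)
      have hitems : (d.insert (pvKey (j : Int)) (PySem.Str.strip l)).items
          = (List.range (j + 1)).map (fun (i : Nat) => (pvKey (i : Int),
              if i = j then PySem.Str.strip l else w i)) := by
        rw [PySem.Dict.items_insert_of_not_contains _ _ hcont, hd, List.range_succ,
          List.map_append]
        simp only [List.map_cons, List.map_nil]
        congr 1
        refine List.map_congr_left fun i hi => ?_
        have hij : i ≠ j := by have := List.mem_range.mp hi; omega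
        simp [hij]
      rw [ih (j + 1) (j + 1) (fun i => if i = j then PySem.Str.strip l else w i) _ hitems
        (le_refl _)]
      have hb : max (j + 1) (j + 1 + rest.length) = max j (j + (l :: rest).length) := by
        simp only [List.length_cons]; omega
      rw [hb]
      refine List.map_congr_left fun i hi => ?_
      simp only [List.length_cons]
      by_cases h1 : j + 1 ≤ i ∧ i < j + 1 + rest.length
      · rw [if_pos h1, if_pos (by omega : j ≤ i ∧ i < j + (rest.length + 1))]
        have h3 : i - j = (i - j - 1) + 1 := by omega
        rw [h3, List.getD_cons_succ]
        have h4 : i - (j + 1) = i - j - 1 := by omega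
        rw [h4]
      · by_cases hij : i = j
        · rw [if_neg h1, if_pos hij, if_pos (by omega : j ≤ i ∧ i < j + (rest.length + 1)),
            show i - j = 0 by omega, List.getD_cons_zero]
        · rw [if_neg h1, if_neg hij,
            if_neg (by omega : ¬(j ≤ i ∧ i < j + (rest.length + 1)))]

-- A's '+0000' fill loop over pyRange 0 b from the empty dict
lemma pvFill_items (b : Int) :
    ((PySem.List.pyRange 0 b 1).foldl (fun d i => d.insert (pvKey i) "+0000")
        PySem.Dict.empty).items
      = (List.range b.toNat).map (fun (i : Nat) => (pvKey (i : Int), "+0000")) := by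
  rw [PySem.List.pyRange_one]
  rw [PySem.Dict.items_foldl_insert_fresh _ _ _ _
    (fun a _ => PySem.Dict.contains_empty _) ?nodup]
  · rw [List.map_map]
    simp only [Int.sub_zero]
    show [] ++ _ = _
    rw [List.nil_append]
    exact List.map_congr_left fun k _ => by simp
  case nodup =>
    rw [List.map_map]
    refine List.Nodup.map_on ?_ (List.nodup_range)
    intro x hx y hy hxy
    have hxy' : pvKey ((x : Nat) : Int) = pvKey ((y : Nat) : Int) := by
      simpa [Int.zero_add] using hxy
    exact pvKey_inj hxy'

-- closed form for port A
lemma pvA_closed (file : List String) (ms : Int) :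
    Allocate_Memory file ms
      = (List.range (max ms.toNat file.length)).map
          (fun (i : Nat) => (pvKey (i : Int),
            if i < file.length then PySem.Str.strip (file.getD i "") else "+0000")) := by
  unfold Allocate_Memory
  have hmain := pvLineFold_items file 0 ms.toNat (fun _ => "+0000") _ (pvFill_items ms)
    (Nat.zero_le _)
  rw [Nat.cast_zero] at hmain
  rw [hmain]
  simp only [Nat.zero_add]
  refine List.map_congr_left fun i _ => ?_
  simp

-- closed form for port B
lemma pvItems_ofList_fresh (pairs : List (String × String))
    (hnd : (pairs.map Prod.fst).Nodup) :
    (PySem.Dict.ofList pairs).items = pairs := by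
  have h : PySem.Dict.ofList pairs
      = List.foldl (fun (d : PySem.Dict String String) (a : String × String) =>
          d.insert (Prod.fst a) (Prod.snd a)) PySem.Dict.empty pairs := rfl
  rw [h, PySem.Dict.items_foldl_insert_fresh _ _ _ _
    (fun a _ => PySem.Dict.contains_empty _) hnd]
  show PySem.Dict.empty.items ++ _ = _
  have he : PySem.Dict.empty.items = ([] : List (String × String)) := rfl
  rw [he, List.nil_append]
  simp

lemma pvB_closed (file : List String) (ms : Int) :
    Allocate_Memory_alt file ms
      = (List.range (max ms.toNat file.length)).map
          (fun (i : Nat) => (pvKey (i : Int),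
            if i < file.length then PySem.Str.strip (file.getD i "") else "+0000")) := by
  simp only [Allocate_Memory_alt]
  rw [PySem.List.pyRange_one, List.map_map]
  rw [pvItems_ofList_fresh _ ?nodup]
  · have hmax : (max ms ((file.map PySem.Str.strip).length : Int) - 0).toNat
        = max ms.toNat file.length := by
      simp only [List.length_map]
      omega
    rw [hmax]
    refine List.map_congr_left fun i hi => ?_
    simp only [Function.comp_apply, Int.zero_add]
    congr 1
    by_cases hlt : i < file.length
    · rw [if_pos (by simp only [List.length_map]; exact_mod_cast hlt), if_pos hlt]
      have ht : ((i : Int)).toNat = i := by omega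
      rw [ht, List.getD_eq_getElem?_getD, List.getD_eq_getElem?_getD, List.getElem?_map]
      rw [List.getElem?_eq_getElem hlt]
      rfl
    · rw [if_neg (by simp only [List.length_map]; exact_mod_cast hlt), if_neg hlt]
  case nodup =>
    rw [List.map_map]
    refine List.Nodup.map_on ?_ (List.nodup_range)
    intro x hx y hy hxy
    have hxy' : pvKey ((x : Nat) : Int) = pvKey ((y : Nat) : Int) := by
      simpa [Int.zero_add] using hxy
    exact pvKey_inj hxy'

-- ===== VERDICT (by name: the statement is the Claim_ definition above) =====
theorem Allocate_Memory_spec : Claim_equal_Allocate_Memory := by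
  intro file memory_size _
  unfold Spec_Allocate_Memory
  rw [pvA_closed, pvB_closed]
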